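-- pv_equiv track=rewrite | github.com/georgebvro/freeCodeCamp-Daily-Coding-Challenge | 2025-12/2025-12-20/purge_most_frequent.py | purge_most_frequent
-- ===== SOURCE A (Python) =====
-- from collections import Counter
--
-- def purge_most_frequent(arr):
--     counts = dict(Counter(arr))
--     max_count = 0
--
--     for element in counts:
--         if counts[element] > max_count:
--             elements_to_remove_set = {element}
--             max_count = counts[element]
--         elif counts[element] == max_count:
--             elements_to_remove_set.add(element)
--
--     return [element for element in arr if element not in elements_to_remove_set]
-- ===== SOURCE B (Python) =====
-- def purge_most_frequent(arr):
--     # Group the indices of arr by value, drop the groups of maximal size,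
--     # and reassemble the survivors by index.
--     positions = {}
--     for i, x in enumerate(arr):
--         positions.setdefault(x, []).append(i)
--     if not positions:
--         return []
--     max_count = max(len(ix) for ix in positions.values())
--     keep = sorted(i for ix in positions.values() if len(ix) != max_count for i in ix)
--     return [arr[i] for i in keep]
-- ===== Notes on version B (the rewrite author's own statement) =====
-- stated objective: alternative
-- what changed: B replaces A's counter plus max-tracking loop that builds a removal set by an index-grouping decomposition: it buckets the indices of arr by value, drops the buckets of maximal size, and reassembles the surviving elements by sorted index.
import Mathlib
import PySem

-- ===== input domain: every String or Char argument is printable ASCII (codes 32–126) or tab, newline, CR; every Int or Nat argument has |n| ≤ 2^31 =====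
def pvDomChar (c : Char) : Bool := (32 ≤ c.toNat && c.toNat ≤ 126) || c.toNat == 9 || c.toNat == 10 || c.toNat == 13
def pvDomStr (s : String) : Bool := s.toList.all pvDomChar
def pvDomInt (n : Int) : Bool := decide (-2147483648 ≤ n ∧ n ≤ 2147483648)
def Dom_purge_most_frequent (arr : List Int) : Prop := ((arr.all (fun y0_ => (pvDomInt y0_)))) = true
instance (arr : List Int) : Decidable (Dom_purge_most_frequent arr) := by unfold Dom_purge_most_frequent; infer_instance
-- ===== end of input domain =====

-- B replaces A's counter + max-tracking removal set by a different decomposition: it groups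
-- the INDICES of arr by value, drops the groups of maximal size, and reassembles the
-- survivors by sorted index (objective: alternative).

-- ===== PORT A =====
-- A's `elements_to_remove_set` is unassigned before the loop; it is only read after the
-- first key (count ≥ 1 > 0) assigns it, and on empty input the final comprehension never
-- reads it, so starting from the empty set is exact.
def purge_most_frequent (arr : List Int) : List Int :=
  let counts := PySem.Dict.counter arr
  let st := counts.keys.foldl
    (fun (st : PySem.Set Int × Int) element =>
      if counts.getD element 0 > st.2 then (PySem.Set.ofList [element], counts.getD element 0)
      else if counts.getD element 0 = st.2 then (PySem.Set.add st.1 element, st.2)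
      else st)
    (PySem.Set.empty, 0)
  arr.filter (fun element => !(PySem.Set.contains st.1 element))

-- ===== PORT B =====
-- `arr[i]` is ported as pyGetD with default 0; every index in `keep` comes from
-- enumerate(arr), so it is always in range and the default is never used.
def purge_most_frequent_alt (arr : List Int) : List Int :=
  let positions := (PySem.List.enumerate arr).foldl
    (fun (d : PySem.Dict Int (List Int)) p => d.modify p.2 [] (fun l => l ++ [p.1]))
    PySem.Dict.empty
  if positions.items = [] then []
  else
    match PySem.List.max? (positions.values.map (fun ix => (ix.length : Int))) (fun v => v) with
    | none => []  -- unreachable: values is nonempty here (totality guard)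
    | some max_count =>
      let keep := PySem.List.sorted
        ((positions.values.filter (fun ix => (ix.length : Int) != max_count)).flatten)
        (fun i => i) false
      keep.map (fun i => PySem.List.pyGetD arr i 0)

-- ===== PRECONDITION & SPEC =====
def Spec_purge_most_frequent (arr : List Int) (out : List Int) : Prop := out = purge_most_frequent_alt arr
instance (arr : List Int) (out : List Int) : Decidable (Spec_purge_most_frequent arr out) := by unfold Spec_purge_most_frequent; infer_instance

-- ===== CLAIM (what is proved, stated in full; the proofs are below) =====
def Claim_equal_purge_most_frequent : Prop := ∀ (arr : List Int), Dom_purge_most_frequent arr → Spec_purge_most_frequent arr (purge_most_frequent arr)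

-- ===== LEMMAS AND PROOFS =====

-- Characterisation of A's loop: final .2 is the running max of the counts over the keys,
-- and the final set holds exactly the elements (seen or initial) whose count equals it.
theorem pv_loopA (counts : PySem.Dict Int Int) :
    ∀ (ks : List Int) (s : PySem.Set Int) (m : Int),
      (∀ x ∈ s, counts.getD x 0 = m) →
      (ks.foldl
        (fun (st : PySem.Set Int × Int) element =>
          if counts.getD element 0 > st.2 then (PySem.Set.ofList [element], counts.getD element 0)
          else if counts.getD element 0 = st.2 then (PySem.Set.add st.1 element, st.2)
          else st) (s, m)).2
        = ks.foldl (fun a k => max a (counts.getD k 0)) m ∧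
      (∀ x, x ∈ (ks.foldl
        (fun (st : PySem.Set Int × Int) element =>
          if counts.getD element 0 > st.2 then (PySem.Set.ofList [element], counts.getD element 0)
          else if counts.getD element 0 = st.2 then (PySem.Set.add st.1 element, st.2)
          else st) (s, m)).1
        ↔ ((x ∈ s ∨ x ∈ ks) ∧ counts.getD x 0 = (ks.foldl (fun a k => max a (counts.getD k 0)) m))) := by
  intro ks
  induction ks with
  | nil =>
    intro s m hs
    refine ⟨rfl, fun x => ?_⟩
    simp only [List.foldl_nil, List.not_mem_nil, or_false]
    exact ⟨fun hx => ⟨hx, hs x hx⟩, fun hx => hx.1⟩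
  | cons k t ih =>
    intro s m hs
    simp only [List.foldl_cons]
    by_cases h1 : counts.getD k 0 > m
    · rw [if_pos h1]
      have hinit : ∀ x ∈ PySem.Set.ofList [k], counts.getD x 0 = counts.getD k 0 := by
        intro x hx
        simp [PySem.Set.mem_ofList] at hx
        simp [hx]
      obtain ⟨h2, h3⟩ := ih (PySem.Set.ofList [k]) (counts.getD k 0) hinit
      have hmax : max m (counts.getD k 0) = counts.getD k 0 := by omega
      rw [hmax]
      refine ⟨h2, fun x => ?_⟩
      rw [h3 x]
      have hle : counts.getD k 0 ≤ t.foldl (fun a j => max a (counts.getD j 0)) (counts.getD k 0) :=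
        (PySem.List.le_foldl_max_int t (fun j => counts.getD j 0) (counts.getD k 0)).1
      constructor
      · rintro ⟨hmem, hg⟩
        refine ⟨?_, hg⟩
        rcases hmem with hmem | hmem
        · simp [PySem.Set.mem_ofList] at hmem
          exact Or.inr (by simp [hmem])
        · exact Or.inr (List.mem_cons_of_mem _ hmem)
      · rintro ⟨hmem, hg⟩
        refine ⟨?_, hg⟩
        rcases hmem with hmem | hmem
        · exact absurd hg (by have := hs x hmem; omega)
        · rcases List.mem_cons.mp hmem with hx | hx
          · exact Or.inl (by simp [PySem.Set.mem_ofList, hx])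
          · exact Or.inr hx
    · rw [if_neg h1]
      by_cases h2 : counts.getD k 0 = m
      · rw [if_pos h2]
        have hinit : ∀ x ∈ PySem.Set.add s k, counts.getD x 0 = m := by
          intro x hx
          rcases (PySem.Set.mem_add _ _ _).mp hx with hx | hx
          · exact hs x hx
          · simpa [hx] using h2
        obtain ⟨h3, h4⟩ := ih (PySem.Set.add s k) m hinit
        have hmax : max m (counts.getD k 0) = m := by omega
        rw [hmax]
        refine ⟨h3, fun x => ?_⟩
        rw [h4 x]
        constructor
        · rintro ⟨hmem, hg⟩
          refine ⟨?_, hg⟩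
          rcases hmem with hmem | hmem
          · rcases (PySem.Set.mem_add _ _ _).mp hmem with hx | hx
            · exact Or.inl hx
            · exact Or.inr (by simp [hx])
          · exact Or.inr (List.mem_cons_of_mem _ hmem)
        · rintro ⟨hmem, hg⟩
          refine ⟨?_, hg⟩
          rcases hmem with hmem | hmem
          · exact Or.inl ((PySem.Set.mem_add _ _ _).mpr (Or.inl hmem))
          · rcases List.mem_cons.mp hmem with hx | hx
            · exact Or.inl ((PySem.Set.mem_add _ _ _).mpr (Or.inr hx))
            · exact Or.inr hx
      · rw [if_neg h2]
        obtain ⟨h3, h4⟩ := ih s m hs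
        have hmax : max m (counts.getD k 0) = m := by omega
        rw [hmax]
        refine ⟨h3, fun x => ?_⟩
        rw [h4 x]
        have hlt : counts.getD k 0 < m := by omega
        have hmle : m ≤ t.foldl (fun a j => max a (counts.getD j 0)) m :=
          (PySem.List.le_foldl_max_int t (fun j => counts.getD j 0) m).1
        constructor
        · rintro ⟨hmem, hg⟩
          refine ⟨?_, hg⟩
          rcases hmem with hmem | hmem
          · exact Or.inl hmem
          · exact Or.inr (List.mem_cons_of_mem _ hmem)
        · rintro ⟨hmem, hg⟩
          refine ⟨?_, hg⟩
          rcases hmem with hmem | hmem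
          · exact Or.inl hmem
          · rcases List.mem_cons.mp hmem with hx | hx
            · exact absurd hg (by subst hx; omega)
            · exact Or.inr hx

-- Partition lemma for B: concatenating, over the kept keys, the indices whose value is
-- that key is a permutation of the filter of the whole index list by the kept predicate.
theorem pv_perm_partition (val : Int → Int) (pk : Int → Bool) :
    ∀ (keys R : List Int), keys.Nodup → (∀ j ∈ R, val j ∈ keys) →
      (((keys.filter pk).map (fun k => R.filter (fun j => val j == k))).flatten).Perm
        (R.filter (fun j => pk (val j))) := by
  intro keys
  induction keys with
  | nil =>
    intro R _ hcov
    have hR : R = [] := List.eq_nil_iff_forall_not_mem.mpr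
      (fun j hj => by simpa using hcov j hj)
    subst hR; simp
  | cons k ks ih =>
    intro R hnd hcov
    have hknotmem : k ∉ ks := (List.nodup_cons.mp hnd).1
    set R1 := R.filter (fun j => val j == k) with hR1
    set R2 := R.filter (fun j => !(val j == k)) with hR2
    have hstep1 : ∀ k' ∈ ks, R.filter (fun j => val j == k') = R2.filter (fun j => val j == k') := by
      intro k' hk'
      have hne : k' ≠ k := fun h => hknotmem (h ▸ hk')
      rw [hR2, List.filter_filter]
      apply (List.filter_congr ?_).symm
      intro j _
      by_cases h : val j = k'
      · simp [h, hne]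
      · simp [h]
    have hmapeq : (ks.filter pk).map (fun k' => R.filter (fun j => val j == k'))
        = (ks.filter pk).map (fun k' => R2.filter (fun j => val j == k')) :=
      List.map_congr_left (fun k' hk' => hstep1 k' (List.mem_of_mem_filter hk'))
    have hcov2 : ∀ j ∈ R2, val j ∈ ks := by
      intro j hj
      have hjR : j ∈ R := List.mem_of_mem_filter hj
      have hne : ¬(val j == k) = true := by
        have := List.of_mem_filter hj
        simpa using this
      rcases List.mem_cons.mp (hcov j hjR) with h | h
      · exact absurd (by simpa using h) hne
      · exact h
    have hIH := ih R2 (List.nodup_cons.mp hnd).2 hcov2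
    have hpermR : (R1 ++ R2).Perm R := List.filter_append_perm _ R
    have hfiltR : ((R1 ++ R2).filter (fun j => pk (val j))).Perm (R.filter (fun j => pk (val j))) :=
      hpermR.filter _
    by_cases hpk : pk k = true
    · rw [List.filter_cons_of_pos hpk, List.map_cons, hmapeq, List.flatten_cons]
      have hR1self : R1.filter (fun j => pk (val j)) = R1 := by
        apply List.filter_eq_self.mpr
        intro j hj
        have hv : val j = k := by simpa using List.of_mem_filter hj
        simpa [hv] using hpk
      have h1 : (R1 ++ ((ks.filter pk).map (fun k' => R2.filter (fun j => val j == k'))).flatten).Perm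
          (R1 ++ R2.filter (fun j => pk (val j))) := hIH.append_left R1
      have h2 : R1 ++ R2.filter (fun j => pk (val j)) = (R1 ++ R2).filter (fun j => pk (val j)) := by
        rw [List.filter_append, hR1self]
      exact h1.trans (h2 ▸ hfiltR)
    · rw [List.filter_cons_of_neg (by simpa using hpk), hmapeq]
      have hR1nil : R1.filter (fun j => pk (val j)) = [] := by
        apply List.filter_eq_nil_iff.mpr
        intro j hj
        have hv : val j = k := by simpa using List.of_mem_filter hj
        simp [hv, hpk]
      refine hIH.trans ?_
      have : (R1 ++ R2).filter (fun j => pk (val j)) = R2.filter (fun j => pk (val j)) := by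
        rw [List.filter_append, hR1nil, List.nil_append]
      exact this ▸ hfiltR

-- ===== VERDICT (by name: the statement is the Claim_ definition above) =====
theorem purge_most_frequent_spec : Claim_equal_purge_most_frequent := by
  intro arr _
  unfold Spec_purge_most_frequent purge_most_frequent purge_most_frequent_alt
  dsimp only
  rcases arr with _ | ⟨a, t⟩
  · rfl
  -- notation
  set A := a :: t with hA
  set val : Int → Int := fun j => PySem.List.pyGetD A j 0 with hval
  set R := PySem.List.pyRange 0 (PySem.List.len A) 1 with hR
  have hmapval : R.map val = A := by
    exact PySem.List.map_pyGetD_pyRange_zero A 0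
  -- the grouping fold, re-expressed as a fold over the index range
  have he : PySem.List.enumerate A = R.map (fun j => (j, val j)) :=
    PySem.List.enumerate_eq_map_pyRange (xs := A) (d := 0)
  have hfoldR : (PySem.List.enumerate A).foldl
      (fun (d : PySem.Dict Int (List Int)) p => d.modify p.2 [] (fun l => l ++ [p.1]))
      PySem.Dict.empty
      = R.foldl (fun d j => d.modify (val j) [] (fun l => l ++ [j])) PySem.Dict.empty := by
    rw [he, List.foldl_map]
  set positions := R.foldl (fun d j => d.modify (val j) [] (fun l => l ++ [j])) PySem.Dict.empty
    with hpos
  rw [hfoldR]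
  -- getD of the grouping dict: the ascending list of indices holding c
  have hget : ∀ c, positions.getD c [] = R.filter (fun j => val j == c) := by
    intro c
    have hsw : positions = (R.map (fun j => (val j, j))).foldl
        (fun d p => d.modify p.1 [] (fun l => l ++ [p.2])) PySem.Dict.empty := by
      rw [List.foldl_map]
    rw [hsw, PySem.Dict.getD_foldl_modify_append, List.filter_map]
    simp [Function.comp_def]
  have hkeys : positions.keys = PySem.Set.ofList A := by
    rw [hpos, PySem.Dict.keys_foldl_modify_key]
    rw [PySem.Set.ofList_eq_foldl, ← hmapval]
    rfl
  have hnodup : positions.keys.Nodup := by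
    rw [hpos]
    exact PySem.Dict.nodup_keys_foldl_modify_key R val [] (fun _ j => (fun l => l ++ [j]))
      PySem.Dict.empty List.nodup_nil
  have hvalues : positions.values = positions.keys.map (fun k => positions.getD k []) :=
    PySem.Dict.values_eq_map_keys positions hnodup []
  -- group sizes are counts
  have hlen : ∀ c, (((positions.getD c []).length : Int)) = (A.count c : Int) := by
    intro c
    rw [hget c]
    have h1 : (R.filter (fun j => val j == c)).length = R.countP (fun j => val j == c) :=
      List.countP_eq_length_filter.symm
    have h2 : A.count c = R.countP (fun j => val j == c) := by
      rw [← hmapval, List.count_eq_countP, List.countP_map]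
      rfl
    rw [h1, h2]
  -- the guard: positions is nonempty
  have hamem : a ∈ positions.keys := by
    rw [hkeys]
    exact (PySem.Set.mem_ofList _ _).mpr List.mem_cons_self
  have hitems : ¬ (positions.items = []) := by
    intro h
    have : positions.keys = [] := by
      show positions.items.map Prod.fst = []
      rw [h]; rfl
    rw [this] at hamem
    exact absurd hamem List.not_mem_nil
  rw [if_neg hitems]
  -- the maximum group size
  obtain ⟨M, hM⟩ : ∃ M, PySem.List.max? (positions.values.map (fun ix => (ix.length : Int)))
      (fun v => v) = some M := by
    cases h : PySem.List.max? (positions.values.map (fun ix => (ix.length : Int))) (fun v => v) with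
    | none =>
      exfalso
      have := (PySem.List.max?_eq_none_iff _ _).mp h
      rw [hvalues] at this
      simp at this
      rw [this] at hamem
      exact absurd hamem List.not_mem_nil
    | some M => exact ⟨M, rfl⟩
  rw [hM]
  -- M is the maximum multiplicity and is achieved
  have hcover : ∀ j ∈ R, val j ∈ positions.keys := by
    intro j hj
    rw [hkeys]
    refine (PySem.Set.mem_ofList _ _).mpr ?_
    rw [← hmapval]
    exact List.mem_map_of_mem hj
  have hMub : ∀ k ∈ positions.keys, ((A.count k : Int)) ≤ M := by
    intro k hk
    have : ((positions.getD k []).length : Int) ∈ positions.values.map (fun ix => (ix.length : Int)) := by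
      rw [hvalues, List.map_map]
      exact List.mem_map_of_mem hk
    have := PySem.List.max?_isMax hM _ this
    rw [hlen k] at this
    exact this
  have hMach : ∃ k0 ∈ positions.keys, ((A.count k0 : Int)) = M := by
    have := PySem.List.max?_mem hM
    rw [hvalues, List.map_map] at this
    obtain ⟨k0, hk0, hk0eq⟩ := List.mem_map.mp this
    exact ⟨k0, hk0, by rw [← hk0eq]; exact (hlen k0).symm⟩
  -- B's result is the count-based filter of A's input list
  have hB : (PySem.List.sorted
        ((positions.values.filter (fun ix => (ix.length : Int) != M)).flatten)
        (fun i => i) false).map val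
      = A.filter (fun x => (A.count x : Int) != M) := by
    have e1 : positions.values.filter (fun ix => (ix.length : Int) != M)
        = (positions.keys.filter (fun k => ((A.count k : Int)) != M)).map
            (fun k => R.filter (fun j => val j == k)) := by
      rw [hvalues, List.filter_map]
      have e1a : positions.keys.filter
            ((fun ix => (ix.length : Int) != M) ∘ (fun k => positions.getD k []))
          = positions.keys.filter (fun k => ((A.count k : Int)) != M) :=
        List.filter_congr (fun k _ => by simp [hlen k])
      rw [e1a]
      exact List.map_congr_left (fun k _ => hget k)
    rw [e1]
    have hperm := pv_perm_partition val (fun k => ((A.count k : Int)) != M)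
      positions.keys R hnodup hcover
    have hpw : (R.filter (fun j => ((A.count (val j) : Int)) != M)).Pairwise
        (fun x y => x < y) := by
      refine List.Pairwise.sublist List.filter_sublist ?_
      rw [hR]
      exact PySem.List.pairwise_lt_pyRange_one 0 (PySem.List.len A)
    have hsort := PySem.List.sorted_eq_of_perm_of_pairwise_lt _ _
      (fun i : Int => i) hperm.symm hpw
    rw [hsort]
    have e2 := (List.filter_map (f := val)
      (p := fun x => ((A.count x : Int)) != M) (l := R)).symm
    rw [hmapval] at e2
    simpa [Function.comp_def] using e2
  dsimp only
  rw [hB]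
  -- A's removal loop keeps exactly the elements of non-maximal multiplicity
  apply List.filter_congr
  intro x hx
  set counts := PySem.Dict.counter A with hc
  have hckeys : counts.keys = PySem.Set.ofList A := PySem.Dict.keys_counter A
  obtain ⟨hloop2, hloop1⟩ := pv_loopA counts counts.keys PySem.Set.empty 0
    (by intro y hy; cases hy)
  set mf := counts.keys.foldl (fun acc k => max acc (counts.getD k 0)) 0 with hmf
  have hubA : ∀ k ∈ counts.keys, counts.getD k 0 ≤ mf := fun k hk =>
    (PySem.List.le_foldl_max_int counts.keys (fun j => counts.getD j 0) 0).2 k hk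
  have hsame : counts.keys = positions.keys := by rw [hckeys, hkeys]
  have hMmf : M ≤ mf := by
    obtain ⟨k0, hk0, hk0eq⟩ := hMach
    have h0 := hubA k0 (by rw [hsame]; exact hk0)
    rw [PySem.Dict.getD_counter] at h0
    omega
  have hmfM : mf = M := by
    have hmem_or : mf = 0 ∨ mf ∈ counts.keys.map (fun k => counts.getD k 0) := by
      have hrw : mf = (counts.keys.map (fun j => counts.getD j 0)).foldl max 0 := by
        rw [List.foldl_map]
      rw [hrw]
      exact PySem.List.foldl_max_mem _ 0
    rcases hmem_or with h | h
    · exfalso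
      have h1 : counts.getD a 0 ≤ mf := hubA a (by rw [hsame]; exact hamem)
      have h2 : counts.getD a 0 = (A.count a : Int) := PySem.Dict.getD_counter A a
      have h3 : 1 ≤ A.count a := List.one_le_count_iff.mpr List.mem_cons_self
      have h4 : 1 ≤ A.count a → (1 : Int) ≤ (A.count a : Int) := fun hh => by exact_mod_cast hh
      have := h4 h3
      omega
    · obtain ⟨k1, hk1, hk1eq⟩ := List.mem_map.mp h
      have h4 : counts.getD k1 0 ≤ M := by
        rw [PySem.Dict.getD_counter]
        exact hMub k1 (by rw [← hsame]; exact hk1)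
      omega
  have hiff := hloop1 x
  have hxk : x ∈ counts.keys := by
    rw [hckeys]; exact (PySem.Set.mem_ofList _ _).mpr hx
  have hgdx : counts.getD x 0 = (A.count x : Int) := PySem.Dict.getD_counter A x
  by_cases hcx : (A.count x : Int) = M
  · have hin := hiff.mpr ⟨Or.inr hxk, by rw [hgdx, hcx, ← hmfM]⟩
    have hcont := (PySem.Set.contains_iff _ _).mpr hin
    rw [hcont]
    simp [hcx]
  · have hout : ¬ x ∈ (counts.keys.foldl
        (fun (st : PySem.Set Int × Int) element =>
          if counts.getD element 0 > st.2 then (PySem.Set.ofList [element], counts.getD element 0)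
          else if counts.getD element 0 = st.2 then (PySem.Set.add st.1 element, st.2)
          else st) (PySem.Set.empty, 0)).1 := by
      intro hmem
      exact hcx (by rw [← hgdx, (hiff.mp hmem).2, hmfM])
    have hcont : PySem.Set.contains ((counts.keys.foldl
        (fun (st : PySem.Set Int × Int) element =>
          if counts.getD element 0 > st.2 then (PySem.Set.ofList [element], counts.getD element 0)
          else if counts.getD element 0 = st.2 then (PySem.Set.add st.1 element, st.2)
          else st) (PySem.Set.empty, 0)).1) x = false := by
      cases hcb : PySem.Set.contains ((counts.keys.foldl
        (fun (st : PySem.Set Int × Int) element =>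
          if counts.getD element 0 > st.2 then (PySem.Set.ofList [element], counts.getD element 0)
          else if counts.getD element 0 = st.2 then (PySem.Set.add st.1 element, st.2)
          else st) (PySem.Set.empty, 0)).1) x with
      | false => rfl
      | true => exact absurd ((PySem.Set.contains_iff _ _).mp hcb) hout
    rw [hcont]
    simp [bne_iff_ne, hcx]
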